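-- pv_equiv track=rewrite | github.com/daniel-reich/ubiquitous-fiesta | epMcaSNzBFSF5uB89_17.py | currently_winning
-- ===== SOURCE A (Python) =====
-- def currently_winning(scores):
--   currently_winner= []
--   myscore, opponentscore= 0,0
--   for i in range(0, len(scores), 2):
--     myscore+= scores[i]
--     opponentscore += scores[i+1]
--
--     if myscore > opponentscore:
--       winner = 'Y'
--     elif myscore < opponentscore:
--       winner = 'O'
--     else:
--       winner = 'T'
--
--     currently_winner.append(winner)
--
--   return currently_winner
-- ===== SOURCE B (Python) =====
-- def currently_winning(scores):
--     # Staged pipeline: alternating-sign prefix sums over the FLAT score list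
--     # (my scores count +, opponent's count -), then the prefixes at odd
--     # positions are exactly the post-round margins; map each margin's sign
--     # to its tag.
--     margins = []
--     m = 0
--     for j, s in enumerate(scores):
--         m += -s if j % 2 == 1 else s
--         margins.append(m)
--     return ['Y' if m > 0 else 'O' if m < 0 else 'T' for m in margins[1::2]]
-- ===== Notes on version B (the rewrite author's own statement) =====
-- stated objective: alternative
-- what changed: B replaces A's pair-indexed loop comparing two running totals with a staged pipeline over the flat list: an alternating-sign prefix-sum scan, a [1::2] slice selecting the post-round margins, and a sign-to-tag map.
import Mathlib
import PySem

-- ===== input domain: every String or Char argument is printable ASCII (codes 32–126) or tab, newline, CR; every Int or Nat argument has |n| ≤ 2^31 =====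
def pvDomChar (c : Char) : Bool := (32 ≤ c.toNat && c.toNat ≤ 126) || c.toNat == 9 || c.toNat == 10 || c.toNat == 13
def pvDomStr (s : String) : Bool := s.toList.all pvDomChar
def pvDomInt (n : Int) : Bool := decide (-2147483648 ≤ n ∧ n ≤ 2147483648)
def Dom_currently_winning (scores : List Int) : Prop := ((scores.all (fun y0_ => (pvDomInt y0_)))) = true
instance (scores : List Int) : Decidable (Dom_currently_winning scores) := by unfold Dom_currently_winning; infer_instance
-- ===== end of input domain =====

-- B recomputes the round leaders by a staged pipeline (alternating-sign prefix sums over the flat list, a [1::2] slice, a sign-to-tag map) instead of A's pair-indexed loop with two running totals; same cost, different decomposition.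


-- ===== PORT A =====
-- A: one loop over range(0, len(scores), 2) maintaining (result list, myscore, opponentscore).
-- scores[i] is ported as pyGetD … 0; inside Pre_ (even length) every index is in range, so the default is never taken.
def currently_winning (scores : List Int) : List String :=
  ((PySem.List.pyRange 0 scores.length 2).foldl
    (fun (st : List String × Int × Int) i =>
      let myscore := st.2.1 + PySem.List.pyGetD scores i 0
      let opponentscore := st.2.2 + PySem.List.pyGetD scores (i + 1) 0
      let winner := if myscore > opponentscore then "Y"
        else if myscore < opponentscore then "O" else "T"
      (st.1 ++ [winner], myscore, opponentscore))
    ([], 0, 0)).1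

-- ===== PORT B =====
-- B: enumerate-driven alternating-sign prefix sums, then the [1::2] slice, then a sign-to-tag map.
-- margins[1::2] never raises in Python (step 2 ≠ 0), so slice? is always some and .getD [] is exact.
def currently_winning_alt (scores : List Int) : List String :=
  let margins := ((PySem.List.enumerate scores 0).foldl
    (fun (st : List Int × Int) js =>
      let m := st.2 + (if PySem.Int.mod js.1 2 == 1 then -js.2 else js.2)
      (st.1 ++ [m], m))
    ([], 0)).1
  ((PySem.List.slice? margins (some 1) none 2).getD []).map
    (fun m => if m > 0 then "Y" else if m < 0 then "O" else "T")

-- ===== PRECONDITION & SPEC =====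
-- Pre_ excludes odd-length lists, on which Python A raises IndexError (scores[i+1] past the end).
def Pre_currently_winning (scores : List Int) : Prop := scores.length % 2 = 0
instance (scores : List Int) : Decidable (Pre_currently_winning scores) := by unfold Pre_currently_winning; infer_instance
def pvWitness_currently_winning : List Int := [3, 1, -2, 4]

def Spec_currently_winning (scores : List Int) (out : List String) : Prop := out = currently_winning_alt scores
instance (scores : List Int) (out : List String) : Decidable (Spec_currently_winning scores out) := by unfold Spec_currently_winning; infer_instance

-- ===== CLAIM (what is proved, stated in full; the proofs are below) =====
def Claim_equal_currently_winning : Prop := ∀ (scores : List Int), Dom_currently_winning scores → Pre_currently_winning scores → Spec_currently_winning scores (currently_winning scores)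

-- ===== LEMMAS AND PROOFS =====

-- Common reference shape: the leader tags as a two-at-a-time recursion carrying both totals.
def pvSpec (m o : Int) : List Int → List String
  | a :: b :: t =>
      (if m + a > o + b then "Y" else if m + a < o + b then "O" else "T") :: pvSpec (m + a) (o + b) t
  | _ => []

-- even/odd position selectors (pvOdds is what the [1::2] slice yields)
def pvEvens : List Int → List Int
  | [] => []
  | [a] => [a]
  | a :: _ :: t => a :: pvEvens t

def pvOdds (l : List Int) : List Int := match l with | [] => [] | _ :: t => pvEvens t

theorem pv_evens_cons (y : Int) (l : List Int) : pvEvens (y :: l) = y :: pvOdds l := by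
  cases l <;> rfl

theorem pv_foldA (h : Nat) : ∀ (t : List Int), t.length = 2 * h → ∀ (acc : List String) (m o : Int),
    ((List.range h).foldl
      (fun (st : List String × Int × Int) k =>
        let myscore := st.2.1 + t.getD (2 * k) 0
        let opponentscore := st.2.2 + t.getD (2 * k + 1) 0
        let winner := if myscore > opponentscore then "Y"
          else if myscore < opponentscore then "O" else "T"
        (st.1 ++ [winner], myscore, opponentscore))
      (acc, m, o)).1 = acc ++ pvSpec m o t := by
  induction h with
  | zero =>
      intro t ht acc m o
      have : t = [] := List.eq_nil_of_length_eq_zero (by omega)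
      subst this; simp [pvSpec]
  | succ h ih =>
      intro t ht acc m o
      match t, ht with
      | a :: b :: t', ht =>
        have ht' : t'.length = 2 * h := by simp at ht; omega
        rw [List.range_succ_eq_map, List.foldl_cons, List.foldl_map]
        rw [PySem.List.foldl_congr_mem _ _
          (fun (st : List String × Int × Int) k =>
            let myscore := st.2.1 + t'.getD (2 * k) 0
            let opponentscore := st.2.2 + t'.getD (2 * k + 1) 0
            let winner := if myscore > opponentscore then "Y"
              else if myscore < opponentscore then "O" else "T"
            (st.1 ++ [winner], myscore, opponentscore)) _
          (by
            intro acc' k _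
            have e1 : 2 * Nat.succ k = 2 * k + 1 + 1 := by omega
            have e2 : 2 * Nat.succ k + 1 = 2 * k + 1 + 1 + 1 := by omega
            simp only [e1, List.getD_cons_succ])]
        show ((List.range h).foldl _
          (acc ++ [if m + a > o + b then "Y" else if m + a < o + b then "O" else "T"],
            m + a, o + b)).1 = _
        rw [ih t' ht']
        simp [pvSpec]

-- B-SIDE ---------------------------------------------------------------
-- margins as a recursion
def pvM (m : Int) (k : Nat) : List Int → List Int
  | [] => []
  | s :: t =>
      let m' := m + (if k % 2 = 1 then -s else s)
      m' :: pvM m' (k + 1) t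

theorem pv_foldB (l : List Int) : ∀ (k : Nat) (acc : List Int) (m : Int),
    ((PySem.List.enumerate l (k : Int)).foldl
      (fun (st : List Int × Int) js =>
        let m := st.2 + (if PySem.Int.mod js.1 2 == 1 then -js.2 else js.2)
        (st.1 ++ [m], m))
      (acc, m)).1 = acc ++ pvM m k l := by
  induction l with
  | nil => intro k acc m; simp [PySem.List.enumerate, pvM]
  | cons x t ih =>
      intro k acc m
      rw [PySem.List.enumerate_cons, List.foldl_cons]
      have hmod : PySem.Int.mod (k : Int) 2 = ((k % 2 : Nat) : Int) := by
        exact_mod_cast PySem.Int.mod_natCast k 2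
      have hcast : ((k : Int) + 1) = ((k + 1 : Nat) : Int) := by push_cast; ring
      have hb : (PySem.Int.mod (k : Int) 2 == (1 : Int)) = decide (k % 2 = 1) := by
        rw [hmod]; rcases Nat.mod_two_eq_zero_or_one k with hp | hp <;> simp [hp]
      show ((PySem.List.enumerate t ((k : Int) + 1)).foldl _
        (acc ++ [m + (if PySem.Int.mod (k : Int) 2 == 1 then -x else x)],
         m + (if PySem.Int.mod (k : Int) 2 == 1 then -x else x))).1 = _
      rw [hcast, hb, ih]
      simp [pvM]

theorem pv_fmap (t : List Int) :
    (List.range ((t.length + 1) / 2)).filterMap (fun k => t[2 * k]?) = pvEvens t := by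
  induction t using pvEvens.induct with
  | case1 => rfl
  | case2 a => norm_num [List.range_one, List.filterMap_cons, pvEvens]
  | case3 a b t ih =>
      have hlen : ((a :: b :: t).length + 1) / 2 = (t.length + 1) / 2 + 1 := by
        simp; omega
      rw [hlen, List.range_succ_eq_map]
      simp only [List.filterMap_cons, List.filterMap_map, Nat.mul_zero, List.getElem?_cons_zero]
      rw [List.filterMap_congr (g := fun k => t[2 * k]?)
        (by intro k _
            show (a :: b :: t)[2 * (k + 1)]? = t[2 * k]?
            rw [show 2 * (k + 1) = 2 * k + 1 + 1 from by omega]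
            simp [List.getElem?_cons_succ])]
      rw [ih]
      rfl

theorem pv_slice_odds (l : List Int) :
    PySem.List.slice? l (some 1) none 2 = some (pvOdds l) := by
  cases l with
  | nil => decide
  | cons a t =>
      have hn : (1 : Int) ≤ ((a :: t).length : Int) := by simp
      simp only [PySem.List.slice?, PySem.List.sliceIndices]
      norm_num [hn]
      have hc : (if 0 < t.length then (((t.length : Int) + 2 - 1) / 2).toNat else 0)
          = (t.length + 1) / 2 := by
        split_ifs <;> omega
      rw [hc, List.filterMap_congr (g := fun k => t[2 * k]?)
        (by intro k _
            show (a :: t)[((1 : Int) + 2 * (k : Int)).toNat]? = t[2 * k]?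
            rw [show ((1 : Int) + 2 * (k : Int)).toNat = 2 * k + 1 from by omega]
            simp [List.getElem?_cons_succ])]
      rw [pv_fmap]
      rfl

theorem pv_map_odds (t : List Int) : ∀ (k : Nat), k % 2 = 0 → ∀ (m o : Int),
    (pvOdds (pvM (m - o) k t)).map (fun m => if m > 0 then "Y" else if m < 0 then "O" else "T")
      = pvSpec m o t := by
  induction t using pvEvens.induct with
  | case1 => intro k _ m o; rfl
  | case2 a => intro k _ m o; rfl
  | case3 a b t ih =>
      intro k hk m o
      have hk1 : ¬ (k % 2 = 1) := by omega
      have hk2 : (k + 1) % 2 = 1 := by omega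
      have hk3 : (k + 1 + 1) % 2 = 0 := by omega
      simp only [pvM, if_neg hk1, if_pos hk2]
      rw [pvOdds, pv_evens_cons, List.map_cons]
      have : m - o + a + -b = (m + a) - (o + b) := by ring
      rw [this, ih (k + 1 + 1) hk3 (m + a) (o + b)]
      show (if (m + a) - (o + b) > 0 then "Y" else if (m + a) - (o + b) < 0 then "O" else "T") :: _ = _
      have htag : (if (m + a) - (o + b) > 0 then "Y" else if (m + a) - (o + b) < 0 then "O" else "T")
          = (if m + a > o + b then "Y" else if m + a < o + b then "O" else "T") := by
        split_ifs <;> first | rfl | omega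
      rw [htag]; rfl

-- ===== VERDICT (by name: the statement is the Claim_ definition above) =====
theorem pv_A_eq_spec (scores : List Int) (h : Nat) (hh : scores.length = 2 * h) :
    currently_winning scores = pvSpec 0 0 scores := by
  unfold currently_winning
  rw [PySem.List.pyRange_of_pos 0 (scores.length : Int) (by norm_num), List.foldl_map]
  have hc : (if (0 : Int) < (scores.length : Int)
      then (((scores.length : Int) - 0 + 2 - 1) / 2).toNat else 0) = h := by
    rw [hh]; push_cast; split_ifs <;> omega
  rw [hc]
  rw [PySem.List.foldl_congr_mem _ _
    (fun (st : List String × Int × Int) k =>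
      let myscore := st.2.1 + scores.getD (2 * k) 0
      let opponentscore := st.2.2 + scores.getD (2 * k + 1) 0
      let winner := if myscore > opponentscore then "Y"
        else if myscore < opponentscore then "O" else "T"
      (st.1 ++ [winner], myscore, opponentscore)) _
    (by
      intro acc' k _
      have e1 : (0 : Int) + 2 * (k : Int) = ((2 * k : Nat) : Int) := by push_cast; ring
      have e2 : ((2 * k : Nat) : Int) + 1 = ((2 * k + 1 : Nat) : Int) := by push_cast; ring
      simp only [e1, e2, PySem.List.pyGetD_natCast])]
  rw [pv_foldA h scores hh [] 0 0]
  rfl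

theorem pv_B_eq_spec (scores : List Int) :
    currently_winning_alt scores = pvSpec 0 0 scores := by
  have hB := pv_foldB scores 0 [] 0
  rw [Nat.cast_zero] at hB
  show ((PySem.List.slice?
      ((PySem.List.enumerate scores 0).foldl
        (fun (st : List Int × Int) js =>
          let m := st.2 + (if PySem.Int.mod js.1 2 == 1 then -js.2 else js.2)
          (st.1 ++ [m], m)) ([], 0)).1 (some 1) none 2).getD []).map
    (fun m => if m > 0 then "Y" else if m < 0 then "O" else "T") = pvSpec 0 0 scores
  rw [hB, List.nil_append, pv_slice_odds, Option.getD_some]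
  have := pv_map_odds scores 0 rfl 0 0
  norm_num at this
  exact this

theorem currently_winning_spec : Claim_equal_currently_winning := by
  intro scores _ hpre
  show currently_winning scores = currently_winning_alt scores
  obtain ⟨h, hh⟩ : ∃ h, scores.length = 2 * h :=
    ⟨scores.length / 2, by unfold Pre_currently_winning at hpre; omega⟩
  rw [pv_A_eq_spec scores h hh, pv_B_eq_spec scores]
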